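-- pv_equiv track=rewrite | github.com/astromancer/recipes | src/recipes/string/brackets.py | show_unpaired
-- ===== SOURCE A (Python) =====
-- CARET = '^'
--
-- def show_unpaired(string, positions, caret=CARET):
--
--     if len(string) >= 100:
--         return ''
--
--     x = [' '] * (len(string) + 1)
--     for _, pos in positions.items():
--         for i in pos:
--             x[i] = caret
--         if not pos:
--             x[-1] = caret
--
--     return (f'\n> {string}'
--             f'\n  {"".join(x)}')
-- ===== SOURCE B (Python) =====
-- CARET = '^'
--
-- def show_unpaired(string, positions, caret=CARET):
--     if len(string) >= 100:
--         return ''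
--     n = len(string)
--     marks = set()
--     for pos in positions.values():
--         if pos:
--             for i in pos:
--                 marks.add(i if i >= 0 else i + n + 1)
--         else:
--             marks.add(n)
--     parts = []
--     prev = 0
--     for idx in sorted(marks):
--         parts.append(' ' * (idx - prev))
--         parts.append(caret)
--         prev = idx + 1
--     parts.append(' ' * (n + 1 - prev))
--     line = ''.join(parts)
--     return f'\n> {string}\n  {line}'
-- ===== Notes on version B (the rewrite author's own statement) =====
-- stated objective: alternative
-- what changed: B replaces A's allocate-an-array-and-scatter-writes construction with a set of normalized mark indices that is sorted once and walked in order, emitting space gaps and carets to assemble the line directly.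
import Mathlib
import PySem

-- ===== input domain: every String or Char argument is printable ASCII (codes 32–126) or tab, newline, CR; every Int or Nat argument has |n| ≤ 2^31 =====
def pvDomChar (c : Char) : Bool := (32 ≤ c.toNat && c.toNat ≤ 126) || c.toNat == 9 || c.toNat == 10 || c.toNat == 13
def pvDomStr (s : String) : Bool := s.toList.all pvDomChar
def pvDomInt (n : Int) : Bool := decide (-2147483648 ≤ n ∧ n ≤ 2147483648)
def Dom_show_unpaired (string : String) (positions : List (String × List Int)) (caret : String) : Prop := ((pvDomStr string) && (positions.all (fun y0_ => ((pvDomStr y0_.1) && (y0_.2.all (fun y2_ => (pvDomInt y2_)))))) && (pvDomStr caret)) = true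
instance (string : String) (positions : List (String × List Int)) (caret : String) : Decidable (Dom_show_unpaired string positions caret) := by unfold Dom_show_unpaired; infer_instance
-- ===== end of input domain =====

-- B assembles the caret line by sorting the set of marked positions once and walking it, emitting space gaps and carets, instead of A's scatter-writes into a preallocated cell array; alternative decomposition, same cost class.

-- ===== PORT A =====
-- A writes caret into a list of one-character cells at each (possibly negative) index;
-- pySetD models x[i] = caret (total form, exact under Pre_, which keeps every index in range).
def show_unpaired (string : String) (positions : List (String × List Int)) (caret : String) : String :=
  if 100 ≤ string.length then "" else
    let x0 : List String := List.replicate (string.length + 1) " "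
    let x := positions.foldl (fun x p =>
      let x1 := p.2.foldl (fun x i => PySem.List.pySetD x i caret) x
      if p.2.isEmpty then PySem.List.pySetD x1 (-1) caret else x1) x0
    "\n> " ++ string ++ "\n  " ++ PySem.Str.join "" x

-- ===== PORT B =====
-- ' ' * k  (empty for k ≤ 0, as in Python)
def pySpaces (k : Int) : String := String.ofList (List.replicate k.toNat ' ')

def show_unpaired_alt (string : String) (positions : List (String × List Int)) (caret : String) : String :=
  if 100 ≤ string.length then "" else
    let n : Int := string.length
    let marks : PySem.Set Int := positions.foldl (fun s p =>
      if p.2.isEmpty then PySem.Set.add s n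
      else p.2.foldl (fun s i => PySem.Set.add s (if 0 ≤ i then i else i + n + 1)) s)
      PySem.Set.empty
    let r := (PySem.List.sorted marks (fun x => x)).foldl
      (fun (acc : String × Int) idx => (acc.1 ++ pySpaces (idx - acc.2) ++ caret, idx + 1)) ("", 0)
    let line := r.1 ++ pySpaces (n + 1 - r.2)
    "\n> " ++ string ++ "\n  " ++ line

-- ===== PRECONDITION & SPEC =====
-- Pre_ excludes exactly the inputs where A raises IndexError: some index outside
-- [-(len(string)+1), len(string)] while len(string) < 100 (for len ≥ 100 A returns '' before indexing).
def Pre_show_unpaired (string : String) (positions : List (String × List Int)) (caret : String) : Prop :=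
  100 ≤ string.length ∨
    ∀ p ∈ positions, ∀ i ∈ p.2, -((string.length : Int) + 1) ≤ i ∧ i ≤ (string.length : Int)
instance (string : String) (positions : List (String × List Int)) (caret : String) : Decidable (Pre_show_unpaired string positions caret) := by unfold Pre_show_unpaired; infer_instance

def pvWitness_show_unpaired : String × (List (String × List Int)) × String :=
  ("a(b", [("(", [1]), (")", [])], "^")

def Spec_show_unpaired (string : String) (positions : List (String × List Int)) (caret : String) (out : String) : Prop := out = show_unpaired_alt string positions caret
instance (string : String) (positions : List (String × List Int)) (caret : String) (out : String) : Decidable (Spec_show_unpaired string positions caret out) := by unfold Spec_show_unpaired; infer_instance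

-- ===== CLAIM (what is proved, stated in full; the proofs are below) =====
def Claim_equal_show_unpaired : Prop := ∀ (string : String) (positions : List (String × List Int)) (caret : String), Dom_show_unpaired string positions caret → Pre_show_unpaired string positions caret → Spec_show_unpaired string positions caret (show_unpaired string positions caret)

-- ===== LEMMAS AND PROOFS =====

-- canonical cell list: one cell per index 0..n, caret exactly where the index is marked
def canonL (n : Nat) (caret : String) (S : List Int) : List String :=
  (List.range (n + 1)).map (fun (j : Nat) => if (j : Int) ∈ S then caret else " ")

theorem canonL_length (n : Nat) (caret : String) (S : List Int) :
    (canonL n caret S).length = n + 1 := by simp [canonL]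

theorem canonL_get (n : Nat) (caret : String) (S : List Int) (j : Nat) (hj : j < n + 1) :
    (canonL n caret S)[j]'(by rw [canonL_length]; omega) = if (j : Int) ∈ S then caret else " " := by
  unfold canonL
  rw [List.getElem_map, List.getElem_range]

theorem canonL_set (n : Nat) (caret : String) (S : List Int) (i : Int)
    (h1 : -((n : Int) + 1) ≤ i) (h2 : i ≤ (n : Int)) :
    PySem.List.pySetD (canonL n caret S) i caret
      = canonL n caret (PySem.Set.add S (if 0 ≤ i then i else i + n + 1)) := by
  set v : Int := if 0 ≤ i then i else i + n + 1 with hvdef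
  have hv0 : 0 ≤ v := by simp only [hvdef]; split_ifs <;> omega
  have hvn : v ≤ (n : Int) := by simp only [hvdef]; split_ifs <;> omega
  have hidx : PySem.List.pyIdx? (canonL n caret S).length i = some v.toNat := by
    rw [canonL_length]; simp only [PySem.List.pyIdx?]
    split_ifs with h h' h'' <;> simp only [hvdef] at * <;> first
      | (congr 1; split_ifs <;> omega)
      | omega
  rw [PySem.List.pySetD, PySem.List.pySet?, hidx]
  simp only [Option.map_some, Option.getD_some]
  apply List.ext_getElem
  · rw [List.length_set, canonL_length, canonL_length]
  · intro j hj1 hj2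
    have hjn : j < n + 1 := by rw [List.length_set, canonL_length] at hj1; omega
    rw [List.getElem_set, canonL_get n caret _ j hjn]
    by_cases hjv : v.toNat = j
    · have hje : (j : Int) = v := by omega
      rw [if_pos hjv, canonL_get n caret _ j hjn]
      have : (j : Int) ∈ PySem.Set.add S v := by rw [PySem.Set.mem_add]; right; exact hje
      rw [if_pos this]
    · have hne : (j : Int) ≠ v := by omega
      rw [if_neg hjv, canonL_get n caret _ j hjn]
      by_cases hmem : (j : Int) ∈ S
      · rw [if_pos hmem, if_pos (by rw [PySem.Set.mem_add]; exact Or.inl hmem)]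
      · rw [if_neg hmem, if_neg (by rw [PySem.Set.mem_add]; rintro (h | h) <;> [exact hmem h; exact hne h])]

theorem canonL_inner (n : Nat) (caret : String) (pos : List Int) :
    ∀ (S : List Int), (∀ i ∈ pos, -((n : Int) + 1) ≤ i ∧ i ≤ (n : Int)) →
    pos.foldl (fun x i => PySem.List.pySetD x i caret) (canonL n caret S)
      = canonL n caret (pos.foldl (fun s i => PySem.Set.add s (if 0 ≤ i then i else i + (n : Int) + 1)) S) := by
  induction pos with
  | nil => intro S _; rfl
  | cons a t ih =>
    intro S h
    simp only [List.foldl_cons]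
    rw [canonL_set n caret S a (h a (List.mem_cons_self)).1 (h a (List.mem_cons_self)).2]
    exact ih _ (fun i hi => h i (List.mem_cons_of_mem _ hi))

theorem canonL_outer (n : Nat) (caret : String) (ps : List (String × List Int)) :
    ∀ (S : List Int), (∀ p ∈ ps, ∀ i ∈ p.2, -((n : Int) + 1) ≤ i ∧ i ≤ (n : Int)) →
    ps.foldl (fun x p =>
        if p.2.isEmpty then PySem.List.pySetD (p.2.foldl (fun x i => PySem.List.pySetD x i caret) x) (-1) caret
        else p.2.foldl (fun x i => PySem.List.pySetD x i caret) x) (canonL n caret S)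
      = canonL n caret (ps.foldl (fun s p =>
          if p.2.isEmpty then PySem.Set.add s (n : Int)
          else p.2.foldl (fun s i => PySem.Set.add s (if 0 ≤ i then i else i + (n : Int) + 1)) s) S) := by
  induction ps with
  | nil => intro S _; rfl
  | cons p t ih =>
    intro S h
    simp only [List.foldl_cons]
    by_cases hp : p.2.isEmpty
    · have hnil : p.2 = [] := List.isEmpty_iff.mp hp
      rw [if_pos hp, if_pos hp, hnil]
      simp only [List.foldl_nil]
      have := canonL_set n caret S (-1) (by omega) (by omega)
      rw [show (if (0:Int) ≤ -1 then (-1:Int) else -1 + (n:Int) + 1) = (n:Int) by norm_num] at this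
      rw [this]
      exact ih _ (fun q hq => h q (List.mem_cons_of_mem _ hq))
    · rw [if_neg hp, if_neg hp]
      rw [canonL_inner n caret p.2 S (h p List.mem_cons_self)]
      exact ih _ (fun q hq => h q (List.mem_cons_of_mem _ hq))

theorem intercalate_nil (l : List (List Char)) : [].intercalate l = l.flatten := by
  induction l with
  | nil => rfl
  | cons a t ih => cases t <;> simp_all [List.intercalate]

theorem join_nil_sep_cons (a : String) (l : List String) :
    PySem.Str.join "" (a :: l) = a ++ PySem.Str.join "" l := by
  apply String.ext
  simp [PySem.Str.join, PySem.Chars.join, intercalate_nil]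

theorem join_nil_sep_append (l1 l2 : List String) :
    PySem.Str.join "" (l1 ++ l2) = PySem.Str.join "" l1 ++ PySem.Str.join "" l2 := by
  apply String.ext
  simp [PySem.Str.join, PySem.Chars.join, intercalate_nil]

theorem join_spaces (l : List Nat) (f : Nat → String) (h : ∀ j ∈ l, f j = " ") :
    PySem.Str.join "" (l.map f) = String.ofList (List.replicate l.length ' ') := by
  induction l with
  | nil => rfl
  | cons a t ih =>
    rw [List.map_cons, join_nil_sep_cons, h a List.mem_cons_self,
        ih (fun j hj => h j (List.mem_cons_of_mem _ hj))]
    apply String.ext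
    simp [List.replicate_succ]

theorem walk_eq (n : Nat) (caret : String) (L : List Int) :
    ∀ (acc : String) (prev : Int), 0 ≤ prev → prev ≤ (n : Int) + 1 →
      L.Pairwise (· < ·) → (∀ m ∈ L, prev ≤ m ∧ m ≤ (n : Int)) →
    (L.foldl (fun (acc : String × Int) idx => (acc.1 ++ pySpaces (idx - acc.2) ++ caret, idx + 1)) (acc, prev)).1
      ++ pySpaces ((n : Int) + 1 - (L.foldl (fun (acc : String × Int) idx => (acc.1 ++ pySpaces (idx - acc.2) ++ caret, idx + 1)) (acc, prev)).2)
    = acc ++ PySem.Str.join "" ((List.range' prev.toNat (((n : Int) + 1 - prev).toNat)).map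
        (fun (j : Nat) => if (j : Int) ∈ L then caret else " ")) := by
  induction L with
  | nil =>
    intro acc prev h0 hn _ _
    simp only [List.foldl_nil]
    rw [join_spaces _ _ (by intro j hj; simp)]
    simp [pySpaces, List.length_range']
  | cons m L' ih =>
    intro acc prev h0 hn hp hb
    have hm := hb m List.mem_cons_self
    have hm0 : 0 ≤ m := le_trans h0 hm.1
    have hpc := List.pairwise_cons.mp hp
    simp only [List.foldl_cons]
    rw [ih (acc ++ pySpaces (m - prev) ++ caret) (m + 1) (by omega) (by omega) hpc.2
        (fun x hx => ⟨by have := hpc.1 x hx; omega, (hb x (List.mem_cons_of_mem _ hx)).2⟩)]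
    -- split the index range at m
    have hsplit : List.range' prev.toNat (((n : Int) + 1 - prev).toNat)
        = List.range' prev.toNat ((m - prev).toNat)
          ++ m.toNat :: List.range' ((m + 1).toNat) (((n : Int) - m).toNat) := by
      rw [show ((n : Int) + 1 - prev).toNat = (m - prev).toNat + ((((n : Int) - m).toNat) + 1) by omega,
          ← List.range'_append,
          show prev.toNat + 1 * (m - prev).toNat = m.toNat by omega,
          List.range'_succ,
          show (m + 1).toNat = m.toNat + 1 by omega]
    rw [hsplit, List.map_append, List.map_cons, join_nil_sep_append, join_nil_sep_cons]
    -- the gap before m is all spaces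
    have hgap : PySem.Str.join ""
        ((List.range' prev.toNat ((m - prev).toNat)).map (fun (j : Nat) => if (j : Int) ∈ m :: L' then caret else " "))
        = pySpaces (m - prev) := by
      rw [join_spaces _ _ ?_, List.length_range']
      · rfl
      · intro j hj
        have hjlt : (j : Int) < m := by
          have := List.mem_range'.mp hj
          omega
        rw [if_neg]
        simp only [List.mem_cons]
        rintro (h | h)
        · omega
        · have := hpc.1 _ h; omega
    have hhead : (if ((m.toNat : Nat) : Int) ∈ m :: L' then caret else " ") = caret := by
      rw [if_pos]
      simp only [List.mem_cons]
      left
      omega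
    have htail : (List.range' ((m + 1).toNat) (((n : Int) - m).toNat)).map
          (fun (j : Nat) => if (j : Int) ∈ m :: L' then caret else " ")
        = (List.range' ((m + 1).toNat) (((n : Int) - m).toNat)).map
          (fun (j : Nat) => if (j : Int) ∈ L' then caret else " ") := by
      apply List.map_congr_left
      intro j hj
      have := List.mem_range'.mp hj
      have hjm : (j : Int) ≠ m := by omega
      simp only [List.mem_cons]
      by_cases hmem : (j : Int) ∈ L'
      · rw [if_pos (Or.inr hmem), if_pos hmem]
      · rw [if_neg (by rintro (h | h); exact hjm h; exact hmem h), if_neg hmem]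
    rw [hgap, hhead, htail]
    simp [String.append_assoc]

theorem marks_inner (n : Nat) (pos : List Int) :
    ∀ (S : List Int), (∀ i ∈ pos, -((n : Int) + 1) ≤ i ∧ i ≤ (n : Int)) →
      S.Nodup → (∀ m ∈ S, 0 ≤ m ∧ m ≤ (n : Int)) →
    (pos.foldl (fun s i => PySem.Set.add s (if 0 ≤ i then i else i + (n : Int) + 1)) S).Nodup
    ∧ ∀ m ∈ pos.foldl (fun s i => PySem.Set.add s (if 0 ≤ i then i else i + (n : Int) + 1)) S,
        0 ≤ m ∧ m ≤ (n : Int) := by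
  induction pos with
  | nil => intro S _ h1 h2; exact ⟨h1, h2⟩
  | cons a t ih =>
    intro S h h1 h2
    simp only [List.foldl_cons]
    refine ih _ (fun i hi => h i (List.mem_cons_of_mem _ hi)) (PySem.Set.nodup_add S _ h1) ?_
    intro m hm
    rcases (PySem.Set.mem_add S _ m).mp hm with hmem | heq
    · exact h2 m hmem
    · have := h a List.mem_cons_self
      subst heq
      constructor <;> (split_ifs <;> omega)

theorem marks_nodup_bounds (n : Nat) (ps : List (String × List Int)) :
    ∀ (S : List Int), (∀ p ∈ ps, ∀ i ∈ p.2, -((n : Int) + 1) ≤ i ∧ i ≤ (n : Int)) →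
      S.Nodup → (∀ m ∈ S, 0 ≤ m ∧ m ≤ (n : Int)) →
    (ps.foldl (fun s p =>
        if p.2.isEmpty then PySem.Set.add s (n : Int)
        else p.2.foldl (fun s i => PySem.Set.add s (if 0 ≤ i then i else i + (n : Int) + 1)) s) S).Nodup
    ∧ ∀ m ∈ ps.foldl (fun s p =>
        if p.2.isEmpty then PySem.Set.add s (n : Int)
        else p.2.foldl (fun s i => PySem.Set.add s (if 0 ≤ i then i else i + (n : Int) + 1)) s) S,
        0 ≤ m ∧ m ≤ (n : Int) := by
  induction ps with
  | nil => intro S _ h1 h2; exact ⟨h1, h2⟩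
  | cons p t ih =>
    intro S h h1 h2
    simp only [List.foldl_cons]
    by_cases hp : p.2.isEmpty
    · rw [if_pos hp]
      refine ih _ (fun q hq => h q (List.mem_cons_of_mem _ hq)) (PySem.Set.nodup_add S _ h1) ?_
      intro m hm
      rcases (PySem.Set.mem_add S _ m).mp hm with hmem | heq
      · exact h2 m hmem
      · subst heq; omega
    · rw [if_neg hp]
      have := marks_inner n p.2 S (h p List.mem_cons_self) h1 h2
      exact ih _ (fun q hq => h q (List.mem_cons_of_mem _ hq)) this.1 this.2

-- ===== VERDICT (by name: the statement is the Claim_ definition above) =====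
theorem show_unpaired_spec : Claim_equal_show_unpaired := by
  intro string positions caret _ hpre
  unfold Spec_show_unpaired show_unpaired show_unpaired_alt
  by_cases hlen : 100 ≤ string.length
  · rw [if_pos hlen, if_pos hlen]
  · rw [if_neg hlen, if_neg hlen]
    have hb : ∀ p ∈ positions, ∀ i ∈ p.2,
        -((string.length : Int) + 1) ≤ i ∧ i ≤ (string.length : Int) :=
      hpre.resolve_left hlen
    dsimp only
    congr 1
    have hrep : List.replicate (string.length + 1) " " = canonL string.length caret PySem.Set.empty := by
      simp [canonL, PySem.Set.empty, List.map_const']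
    have hmarks := marks_nodup_bounds string.length positions PySem.Set.empty hb
      (by simp [PySem.Set.empty]) (by intro m hm; simp [PySem.Set.empty] at hm)
    have hnd : (PySem.List.sorted (positions.foldl (fun s p =>
        if p.2.isEmpty then PySem.Set.add s (string.length : Int)
        else p.2.foldl (fun s i => PySem.Set.add s (if 0 ≤ i then i else i + (string.length : Int) + 1)) s)
        PySem.Set.empty) (fun x => x)).Nodup :=
      ((PySem.List.sorted_perm _ _ _).nodup_iff).mpr hmarks.1
    have hLpair : (PySem.List.sorted (positions.foldl (fun s p =>
        if p.2.isEmpty then PySem.Set.add s (string.length : Int)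
        else p.2.foldl (fun s i => PySem.Set.add s (if 0 ≤ i then i else i + (string.length : Int) + 1)) s)
        PySem.Set.empty) (fun x => x)).Pairwise (· < ·) := by
      have hle := PySem.List.sorted_pairwise (positions.foldl (fun s p =>
        if p.2.isEmpty then PySem.Set.add s (string.length : Int)
        else p.2.foldl (fun s i => PySem.Set.add s (if 0 ≤ i then i else i + (string.length : Int) + 1)) s)
        PySem.Set.empty) (fun x => x)
      have hne : (PySem.List.sorted (positions.foldl (fun s p =>
        if p.2.isEmpty then PySem.Set.add s (string.length : Int)
        else p.2.foldl (fun s i => PySem.Set.add s (if 0 ≤ i then i else i + (string.length : Int) + 1)) s)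
        PySem.Set.empty) (fun x => x)).Pairwise (· ≠ ·) := hnd
      exact (hle.and hne).imp (fun h => lt_of_le_of_ne h.1 h.2)
    have hLb : ∀ m ∈ (PySem.List.sorted (positions.foldl (fun s p =>
        if p.2.isEmpty then PySem.Set.add s (string.length : Int)
        else p.2.foldl (fun s i => PySem.Set.add s (if 0 ≤ i then i else i + (string.length : Int) + 1)) s)
        PySem.Set.empty) (fun x => x)), 0 ≤ m ∧ m ≤ (string.length : Int) :=
      fun m hm => hmarks.2 m ((PySem.List.mem_sorted _ _ _ _).mp hm)
    rw [hrep, canonL_outer string.length caret positions PySem.Set.empty hb]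
    rw [walk_eq string.length caret _ "" 0 (by omega) (by omega) hLpair hLb]
    rw [show ((0:Int)).toNat = 0 by rfl, show (((string.length : Int)) + 1 - 0).toNat = string.length + 1 by omega,
        ← List.range_eq_range']
    have hmapeq : (List.range (string.length + 1)).map
        (fun (j : Nat) => if (j : Int) ∈ (PySem.List.sorted (positions.foldl (fun s p =>
          if p.2.isEmpty then PySem.Set.add s (string.length : Int)
          else p.2.foldl (fun s i => PySem.Set.add s (if 0 ≤ i then i else i + (string.length : Int) + 1)) s)
          PySem.Set.empty) (fun x => x)) then caret else " ")
        = canonL string.length caret (positions.foldl (fun s p =>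
          if p.2.isEmpty then PySem.Set.add s (string.length : Int)
          else p.2.foldl (fun s i => PySem.Set.add s (if 0 ≤ i then i else i + (string.length : Int) + 1)) s)
          PySem.Set.empty) := by
      unfold canonL
      simp only [PySem.List.mem_sorted]
    rw [hmapeq]
    simp
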